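-- pv_equiv track=rewrite | github.com/sanjeevan11/immigration-whatsapp-bot | app.py | build_smart_checklist
-- ===== SOURCE A (Python) =====
-- def build_smart_checklist(cat, sub, answers, base_list):
--     A = {q.lower(): a for q, a in (answers or {}).items()}
--     smart = list(base_list or [])
--     def add(x):
--         if x not in smart: smart.append(x)
--
--     # Common enrichments
--     if any("refusal" in q and A[q] == "Yes" for q in A): add("Previous refusal letters / decision notices")
--     if any("children" in q and A[q] == "Yes" for q in A): add("Children’s birth certificates & custody/consent")
--     if any("english" in q and A[q] == "Yes" for q in A): add("English language certificate (full score sheet)")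
--     if any("tb" in q and A[q] == "Yes" for q in A): add("TB test certificate")
--     if any("accommodation" in q and A[q] == "Yes" for q in A): add("Accommodation inspection report (if available)")
--     if any("funds" in q and A[q] == "Yes" for q in A): add("Bank statements (maintained 28 days)")
--
--     key = f"{(cat or '').lower()}|{(sub or '').lower()}"
--     if "family immigration|spouse/partner visa" in key:
--         add("6 months payslips & bank statements (or self-employment tax returns)")
--         add("Relationship evidence over time (photos/travel/logs)")
--     if "work immigration|skilled worker visa" in key:
--         add("Signed offer/contract")
--         add("Sponsor licence number (on CoS)")
--     if "study immigration|student visa" in key: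
--         add("CAS statement & tuition fee receipt")
--     if "visit immigration|standard visitor visa" in key:
--         add("Employer leave letter and strong home-ties evidence")
--
--     return smart
-- ===== SOURCE B (Python) =====
-- def build_smart_checklist(cat, sub, answers, base_list):
--     A = {q.lower(): a for q, a in (answers or {}).items()}
--     smart = list(base_list or [])
--     def add(x):
--         if x not in smart: smart.append(x)
--
--     rules = [
--         ("refusal", "Previous refusal letters / decision notices"),
--         ("children", "Children\u2019s birth certificates & custody/consent"),
--         ("english", "English language certificate (full score sheet)"),
--         ("tb", "TB test certificate"),
--         ("accommodation", "Accommodation inspection report (if available)"),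
--         ("funds", "Bank statements (maintained 28 days)"),
--     ]
--     # One pass over A: collect which keywords occur in a question answered "Yes".
--     matched = set()
--     for q, a in A.items():
--         if a == "Yes":
--             for kw, _item in rules:
--                 if kw in q:
--                     matched.add(kw)
--     for kw, item in rules:
--         if kw in matched:
--             add(item)
--
--     key = f"{(cat or '').lower()}|{(sub or '').lower()}"
--     if "family immigration|spouse/partner visa" in key:
--         add("6 months payslips & bank statements (or self-employment tax returns)")
--         add("Relationship evidence over time (photos/travel/logs)")
--     if "work immigration|skilled worker visa" in key:
--         add("Signed offer/contract")
--         add("Sponsor licence number (on CoS)")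
--     if "study immigration|student visa" in key:
--         add("CAS statement & tuition fee receipt")
--     if "visit immigration|standard visitor visa" in key:
--         add("Employer leave letter and strong home-ties evidence")
--
--     return smart
-- ===== Notes on version B (the rewrite author's own statement) =====
-- stated objective: alternative
-- what changed: B replaces A's six separate any(...) scans of the answers dict by a single pass that collects matched keywords into a set, then emits checklist items by iterating an ordered (keyword, item) rule table; the category/subcategory substring block is unchanged.
import Mathlib
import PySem

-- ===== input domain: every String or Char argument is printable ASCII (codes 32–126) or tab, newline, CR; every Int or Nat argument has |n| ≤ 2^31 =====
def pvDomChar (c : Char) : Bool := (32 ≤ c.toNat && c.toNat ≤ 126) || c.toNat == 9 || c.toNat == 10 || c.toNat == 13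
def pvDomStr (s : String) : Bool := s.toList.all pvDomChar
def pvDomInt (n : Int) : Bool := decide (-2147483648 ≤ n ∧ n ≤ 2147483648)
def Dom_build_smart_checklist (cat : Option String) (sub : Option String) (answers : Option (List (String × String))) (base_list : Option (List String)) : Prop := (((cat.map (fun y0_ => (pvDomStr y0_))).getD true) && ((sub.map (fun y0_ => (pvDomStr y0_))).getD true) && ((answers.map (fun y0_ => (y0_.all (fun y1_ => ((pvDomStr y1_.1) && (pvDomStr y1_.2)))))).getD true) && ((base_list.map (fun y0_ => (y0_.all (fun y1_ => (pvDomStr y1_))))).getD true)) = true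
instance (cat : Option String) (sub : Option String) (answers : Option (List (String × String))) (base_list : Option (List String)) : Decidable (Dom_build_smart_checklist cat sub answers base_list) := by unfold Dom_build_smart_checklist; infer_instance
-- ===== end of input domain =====

-- B replaces A's six separate `any(...)` scans of the answers dict by one pass that collects
-- matched keywords into a set, then emits the items from an ordered (keyword, item) rule table
-- (objective: alternative decomposition; same return value).


-- ===== PORT A =====
-- `add(x)`: append x unless already present (shared verbatim by both Pythons)
def bscAdd (smart : List String) (x : String) : List String :=
  if smart.contains x then smart else smart ++ [x]

-- `A = {q.lower(): a for q, a in (answers or {}).items()}` (shared verbatim by both Pythons)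
def bscDict (answers : Option (List (String × String))) : PySem.Dict String String :=
  (PySem.Dict.ofList (answers.getD [])).items.foldl
    (fun d p => d.insert (PySem.Str.lower p.1) p.2) PySem.Dict.empty

-- `any(kw in q and A[q] == "Yes" for q in A)`
def bscAnyYes (d : PySem.Dict String String) (kw : String) : Bool :=
  d.keys.any (fun q => PySem.Str.isIn kw q && (d.get? q == some "Yes"))

def build_smart_checklist (cat : Option String) (sub : Option String) (answers : Option (List (String × String))) (base_list : Option (List String)) : List String :=
  let d := bscDict answers
  let smart := base_list.getD []
  let smart := if bscAnyYes d "refusal" then bscAdd smart "Previous refusal letters / decision notices" else smart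
  let smart := if bscAnyYes d "children" then bscAdd smart "Children’s birth certificates & custody/consent" else smart
  let smart := if bscAnyYes d "english" then bscAdd smart "English language certificate (full score sheet)" else smart
  let smart := if bscAnyYes d "tb" then bscAdd smart "TB test certificate" else smart
  let smart := if bscAnyYes d "accommodation" then bscAdd smart "Accommodation inspection report (if available)" else smart
  let smart := if bscAnyYes d "funds" then bscAdd smart "Bank statements (maintained 28 days)" else smart
  let key := PySem.Str.lower (cat.getD "") ++ "|" ++ PySem.Str.lower (sub.getD "")
  let smart := if PySem.Str.isIn "family immigration|spouse/partner visa" key then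
      bscAdd (bscAdd smart "6 months payslips & bank statements (or self-employment tax returns)")
        "Relationship evidence over time (photos/travel/logs)" else smart
  let smart := if PySem.Str.isIn "work immigration|skilled worker visa" key then
      bscAdd (bscAdd smart "Signed offer/contract") "Sponsor licence number (on CoS)" else smart
  let smart := if PySem.Str.isIn "study immigration|student visa" key then
      bscAdd smart "CAS statement & tuition fee receipt" else smart
  let smart := if PySem.Str.isIn "visit immigration|standard visitor visa" key then
      bscAdd smart "Employer leave letter and strong home-ties evidence" else smart
  smart

-- ===== PORT B =====
-- the ordered rule table of B
def bscRules : List (String × String) :=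
  [("refusal", "Previous refusal letters / decision notices"),
   ("children", "Children’s birth certificates & custody/consent"),
   ("english", "English language certificate (full score sheet)"),
   ("tb", "TB test certificate"),
   ("accommodation", "Accommodation inspection report (if available)"),
   ("funds", "Bank statements (maintained 28 days)")]

-- B's single pass over the answers dict collecting the matched keywords
def bscMatched (d : PySem.Dict String String) : PySem.Set String :=
  d.items.foldl
    (fun m p =>
      if p.2 == "Yes" then
        bscRules.foldl (fun m kp => if PySem.Str.isIn kp.1 p.1 then PySem.Set.add m kp.1 else m) m
      else m)
    PySem.Set.empty

def build_smart_checklist_alt (cat : Option String) (sub : Option String) (answers : Option (List (String × String))) (base_list : Option (List String)) : List String :=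
  let d := bscDict answers
  let matched := bscMatched d
  let smart := bscRules.foldl
    (fun smart kp => if PySem.Set.contains matched kp.1 then bscAdd smart kp.2 else smart)
    (base_list.getD [])
  let key := PySem.Str.lower (cat.getD "") ++ "|" ++ PySem.Str.lower (sub.getD "")
  let smart := if PySem.Str.isIn "family immigration|spouse/partner visa" key then
      bscAdd (bscAdd smart "6 months payslips & bank statements (or self-employment tax returns)")
        "Relationship evidence over time (photos/travel/logs)" else smart
  let smart := if PySem.Str.isIn "work immigration|skilled worker visa" key then
      bscAdd (bscAdd smart "Signed offer/contract") "Sponsor licence number (on CoS)" else smart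
  let smart := if PySem.Str.isIn "study immigration|student visa" key then
      bscAdd smart "CAS statement & tuition fee receipt" else smart
  let smart := if PySem.Str.isIn "visit immigration|standard visitor visa" key then
      bscAdd smart "Employer leave letter and strong home-ties evidence" else smart
  smart

-- ===== PRECONDITION & SPEC =====
def Spec_build_smart_checklist (cat : Option String) (sub : Option String) (answers : Option (List (String × String))) (base_list : Option (List String)) (out : List String) : Prop := out = build_smart_checklist_alt cat sub answers base_list
instance (cat : Option String) (sub : Option String) (answers : Option (List (String × String))) (base_list : Option (List String)) (out : List String) : Decidable (Spec_build_smart_checklist cat sub answers base_list out) := by unfold Spec_build_smart_checklist; infer_instance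

-- ===== CLAIM (what is proved, stated in full; the proofs are below) =====
def Claim_equal_build_smart_checklist : Prop := ∀ (cat : Option String) (sub : Option String) (answers : Option (List (String × String))) (base_list : Option (List String)), Dom_build_smart_checklist cat sub answers base_list → Spec_build_smart_checklist cat sub answers base_list (build_smart_checklist cat sub answers base_list)

-- ===== LEMMAS AND PROOFS =====

-- membership in B's inner keyword loop
theorem bsc_mem_inner (l : List (String × String)) (q : String) (m : PySem.Set String) (kw : String) :
    kw ∈ l.foldl (fun m kp => if PySem.Str.isIn kp.1 q then PySem.Set.add m kp.1 else m) m ↔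
    kw ∈ m ∨ ∃ kp ∈ l, PySem.Str.isIn kp.1 q = true ∧ kw = kp.1 := by
  induction l generalizing m with
  | nil => simp
  | cons p t ih =>
    simp only [List.foldl_cons]
    by_cases h : PySem.Str.isIn p.1 q = true
    · rw [if_pos h, ih, PySem.Set.mem_add, List.exists_mem_cons_iff]
      simp only [h, true_and]
      rw [or_assoc]
    · rw [if_neg h, ih, List.exists_mem_cons_iff]
      rw [Bool.not_eq_true] at h
      simp only [h, Bool.false_eq_true, false_and, false_or]
  -- membership in B's outer pass over the answers items

theorem bsc_mem_matched (items : List (String × String)) (m : PySem.Set String) (kw : String) :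
    kw ∈ items.foldl
      (fun m p =>
        if p.2 == "Yes" then
          bscRules.foldl (fun m kp => if PySem.Str.isIn kp.1 p.1 then PySem.Set.add m kp.1 else m) m
        else m) m ↔
    kw ∈ m ∨ ∃ p ∈ items, p.2 = "Yes" ∧ ∃ kp ∈ bscRules, PySem.Str.isIn kp.1 p.1 = true ∧ kw = kp.1 := by
  induction items generalizing m with
  | nil => simp
  | cons p t ih =>
    simp only [List.foldl_cons]
    by_cases h : p.2 = "Yes"
    · rw [if_pos (by simp [h]), ih, bsc_mem_inner, List.exists_mem_cons_iff]
      simp only [h, true_and]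
      rw [or_assoc]
    · rw [if_neg (by simp [h]), ih, List.exists_mem_cons_iff]
      simp only [h, false_and, false_or]

-- B's matched-set test agrees with A's `any` scan, for a keyword of the rule table
theorem bsc_contains_matched (d : PySem.Dict String String) (hnd : d.keys.Nodup)
    (kw : String) (hkw : kw ∈ bscRules.map Prod.fst) :
    PySem.Set.contains (bscMatched d) kw = bscAnyYes d kw := by
  rw [Bool.eq_iff_iff, PySem.Set.contains_iff, bscAnyYes, List.any_eq_true]
  unfold bscMatched
  rw [bsc_mem_matched]
  simp only [PySem.Set.empty, List.not_mem_nil, false_or]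
  constructor
  · rintro ⟨p, hp, hYes, kp, _hkp, hin, rfl⟩
    refine ⟨p.1, ?_, ?_⟩
    · show p.1 ∈ d.items.map Prod.fst
      exact List.mem_map.mpr ⟨p, hp, rfl⟩
    · have hget : d.get? p.1 = some p.2 :=
        PySem.Dict.get?_of_mem_items d (by simpa using hp) hnd
      rw [Bool.and_eq_true]
      exact ⟨hin, by simp [hget, hYes]⟩
  · rintro ⟨q, hq, hcond⟩
    rw [Bool.and_eq_true] at hcond
    obtain ⟨hin, hget⟩ := hcond
    have hget' : d.get? q = some "Yes" := by simpa using hget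
    have hmem : (q, "Yes") ∈ d.items :=
      (PySem.Dict.get?_eq_some_iff_mem_items d q "Yes" hnd).mp hget'
    obtain ⟨kp, hkp, rfl⟩ := List.mem_map.mp hkw
    exact ⟨(q, "Yes"), hmem, rfl, kp, hkp, hin, rfl⟩

-- the lowered answers dict has distinct keys
set_option maxHeartbeats 1000000 in
theorem bsc_nodup_keys (answers : Option (List (String × String))) : (bscDict answers).keys.Nodup := by
  exact PySem.Dict.nodup_keys_foldl_insert_key ((PySem.Dict.ofList (answers.getD [])).items)
    (fun p => PySem.Str.lower p.1) (fun _ p => p.2) PySem.Dict.empty PySem.Dict.nodup_keys_empty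

set_option maxHeartbeats 1000000 in
theorem bsc_eq (cat : Option String) (sub : Option String) (answers : Option (List (String × String))) (base_list : Option (List String)) :
    build_smart_checklist cat sub answers base_list = build_smart_checklist_alt cat sub answers base_list := by
  have hnd := bsc_nodup_keys answers
  have h := fun kw hkw => bsc_contains_matched (bscDict answers) hnd kw hkw
  have h1 := h "refusal" (by simp [bscRules])
  have h2 := h "children" (by simp [bscRules])
  have h3 := h "english" (by simp [bscRules])
  have h4 := h "tb" (by simp [bscRules])
  have h5 := h "accommodation" (by simp [bscRules])
  have h6 := h "funds" (by simp [bscRules])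
  simp only [build_smart_checklist, build_smart_checklist_alt, bscRules, List.foldl_cons,
    List.foldl_nil]
  rw [h1, h2, h3, h4, h5, h6]

-- ===== VERDICT (by name: the statement is the Claim_ definition above) =====
theorem build_smart_checklist_spec : Claim_equal_build_smart_checklist := by
  intro cat sub answers base_list _
  unfold Spec_build_smart_checklist
  exact bsc_eq cat sub answers base_list
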